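-- pv_equiv track=rewrite | github.com/sdu-wza/Innovation-and-Entrepreneurship-Practice | Project5/optimized.py | compute_wnaf
-- ===== SOURCE A (Python) =====
-- def compute_wnaf(k: int, w: int):
--     """返回 wNAF（little-endian list of signed digits）"""
--     if k == 0:
--         return []
--     k = int(k)
--     wnaf = []
--     two_w = 1 << w
--     two_w_minus1 = 1 << (w-1)
--     while k > 0:
--         if k & 1:
--             d = k % two_w
--             if d >= two_w_minus1:
--                 d = d - two_w
--             k = k - d
--             wnaf.append(d)
--         else:
--             wnaf.append(0)
--         k >>= 1
--     return wnaf
-- ===== SOURCE B (Python) =====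
-- def compute_wnaf(k: int, w: int):
--     """wNAF (little-endian signed digits). After each nonzero digit the next
--     w-1 digits are guaranteed zero, so emit them in bulk and divide by 2^w at
--     once, instead of discovering them bit by bit; the digit itself comes from
--     the branchless centered-mod formula."""
--     if k <= 0:
--         return []
--     m = 1 << w
--     h = m >> 1
--     out = []
--     while k:
--         if k % 2:
--             d = (k + h) % m - h
--             out.append(d)
--             k = (k - d) // m
--             if k:
--                 out += [0] * (w - 1)
--         else:
--             out.append(0)
--             k //= 2
--     return out
-- ===== Notes on version B (the rewrite author's own statement) =====
-- stated objective: alternative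
-- what changed: Instead of A's per-bit loop that tests each bit and discovers zeros one iteration at a time, B uses the wNAF invariant that every nonzero digit is followed by w-1 zeros: it emits the digit (computed by a branchless centered-mod formula (k+h)%m-h rather than A's conditional adjustment), appends those w-1 zeros in bulk, and divides k by 2^w in one step.
import Mathlib
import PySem

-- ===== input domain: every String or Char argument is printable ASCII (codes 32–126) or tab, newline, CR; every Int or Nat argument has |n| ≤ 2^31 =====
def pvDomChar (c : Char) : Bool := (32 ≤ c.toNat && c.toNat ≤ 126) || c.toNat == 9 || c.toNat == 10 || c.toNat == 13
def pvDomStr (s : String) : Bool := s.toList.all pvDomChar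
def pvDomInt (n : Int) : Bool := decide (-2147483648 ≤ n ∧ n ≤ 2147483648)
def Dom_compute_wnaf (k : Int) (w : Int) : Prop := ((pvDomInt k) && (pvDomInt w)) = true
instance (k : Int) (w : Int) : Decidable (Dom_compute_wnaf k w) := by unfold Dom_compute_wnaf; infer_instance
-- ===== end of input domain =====

-- B emits the w-1 zeros that provably follow each nonzero wNAF digit in bulk
-- (dividing by 2^w at once) and computes the digit by a branchless centered-mod
-- formula, instead of A's one-bit-per-iteration loop; alternative, same cost.


-- ===== PORT A =====
-- A's while-loop; fuel only makes the recursion total (on Pre_ the loop runs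
-- at most k.toNat iterations, so fuel k.toNat+1 is never exhausted there).
-- `k & 1` is ported as `k % 2` (equal in Python for every int) and the
-- truthiness test as `≠ 0`; `k >> 1` is floor division by 2 (exact).
def wnafLoopA (two_w h : Int) : Nat → Int → List Int
  | 0, _ => []
  | fuel+1, k =>
    if 0 < k then
      if PySem.Int.mod k 2 ≠ 0 then
        let d0 := PySem.Int.mod k two_w
        let d := if d0 ≥ h then d0 - two_w else d0
        d :: wnafLoopA two_w h fuel (PySem.Int.floordiv (k - d) 2)
      else
        0 :: wnafLoopA two_w h fuel (PySem.Int.floordiv k 2)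
    else []

-- `1 << w` ported as 2 ^ w.toNat: exact for w ≥ 0; for w < 0 Python raises
-- ValueError (those inputs are outside Pre_ unless k = 0, where A returns
-- before computing the shifts, as does this port).
def compute_wnaf (k : Int) (w : Int) : List Int :=
  if k = 0 then []
  else wnafLoopA (2 ^ w.toNat) (2 ^ (w - 1).toNat) (k.toNat + 1) k

-- ===== PORT B =====
-- B's while-loop (fuel as above); z is the zero-run length w-1 of `[0]*(w-1)`
-- (List.replicate (w-1).toNat, exact: Python's [0]*n is [] for n ≤ 0).
def wnafLoopB (m h : Int) (z : Nat) : Nat → Int → List Int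
  | 0, _ => []
  | fuel+1, k =>
    if k ≠ 0 then
      if PySem.Int.mod k 2 ≠ 0 then
        let d := PySem.Int.mod (k + h) m - h
        let k' := PySem.Int.floordiv (k - d) m
        d :: (if k' ≠ 0 then List.replicate z 0 else []) ++ wnafLoopB m h z fuel k'
      else
        0 :: wnafLoopB m h z fuel (PySem.Int.floordiv k 2)
    else []

def compute_wnaf_alt (k : Int) (w : Int) : List Int :=
  if k ≤ 0 then []
  else
    let m : Int := 2 ^ w.toNat          -- 1 << w, exact for w ≥ 0
    let h : Int := PySem.Int.floordiv m 2   -- m >> 1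
    wnafLoopB m h ((w - 1).toNat) (k.toNat + 1) k

-- ===== PRECONDITION & SPEC =====
-- Pre_ admits exactly the inputs where A returns: it excludes w ≤ 0 with
-- k ≠ 0 (A raises ValueError on the negative shift count) and w = 1 with
-- k > 0 (A's loop cycles 1 → 2 → 1 forever, so A never returns).
def Pre_compute_wnaf (k : Int) (w : Int) : Prop :=
  2 ≤ w ∨ k = 0 ∨ (k < 0 ∧ 1 ≤ w)
instance (k : Int) (w : Int) : Decidable (Pre_compute_wnaf k w) := by
  unfold Pre_compute_wnaf; infer_instance

def pvWitness_compute_wnaf : Int × Int := (23, 4)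

def Spec_compute_wnaf (k : Int) (w : Int) (out : List Int) : Prop := out = compute_wnaf_alt k w
instance (k : Int) (w : Int) (out : List Int) : Decidable (Spec_compute_wnaf k w out) := by unfold Spec_compute_wnaf; infer_instance

-- ===== CLAIM (what is proved, stated in full; the proofs are below) =====
def Claim_equal_compute_wnaf : Prop := ∀ (k : Int) (w : Int), Dom_compute_wnaf k w → Pre_compute_wnaf k w → Spec_compute_wnaf k w (compute_wnaf k w)

-- ===== LEMMAS AND PROOFS =====

-- A's two digit computations agree: conditional adjustment = centered mod.
lemma digit_eq (k h : Int) (hh : 0 < h) :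
    (if PySem.Int.mod k (2 * h) ≥ h then PySem.Int.mod k (2 * h) - 2 * h
     else PySem.Int.mod k (2 * h)) = PySem.Int.mod (k + h) (2 * h) - h := by
  rw [PySem.Int.mod_eq_emod_of_pos (by omega), PySem.Int.mod_eq_emod_of_pos (by omega)]
  have h1 : (k + h) % (2 * h) = (k % (2 * h) + h) % (2 * h) := by
    conv_lhs => rw [← Int.emod_add_emod]
  have hr0 : 0 ≤ k % (2 * h) := Int.emod_nonneg k (by omega)
  have hr1 : k % (2 * h) < 2 * h := Int.emod_lt_of_pos k (by omega)
  set r := k % (2 * h) with hr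
  by_cases hc : r ≥ h
  · have h2 : (r + h) % (2 * h) = ((r + h) - 2 * h) % (2 * h) := (Int.sub_emod_right _ _).symm
    have h3 : ((r + h) - 2 * h) % (2 * h) = (r + h) - 2 * h := Int.emod_eq_of_lt (by omega) (by omega)
    rw [if_pos hc, h1, h2, h3]; ring
  · have h3 : (r + h) % (2 * h) = r + h := Int.emod_eq_of_lt (by omega) (by omega)
    rw [if_neg hc, h1, h3]; ring

lemma loopA_nil (m h : Int) (f : Nat) (k : Int) (hk : ¬ 0 < k) :
    wnafLoopA m h f k = [] := by
  cases f with
  | zero => rfl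
  | succ f => simp [wnafLoopA, hk]

lemma loopB_nil (m h : Int) (z f : Nat) :
    wnafLoopB m h z f 0 = [] := by
  cases f with
  | zero => rfl
  | succ f => simp [wnafLoopB]

-- A consumes a run of 2-power factors one zero at a time.
lemma loopA_zeros (m h : Int) (j : Nat) :
    ∀ (t : Int) (f : Nat), 0 < t → j ≤ f →
      wnafLoopA m h f (2 ^ j * t) = List.replicate j 0 ++ wnafLoopA m h (f - j) t := by
  induction j with
  | zero => intro t f ht hf; simp
  | succ j IHj =>
      intro t f ht hf
      obtain ⟨f, rfl⟩ : ∃ f', f = f' + 1 := ⟨f - 1, by omega⟩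
      have hk : (0:Int) < 2 ^ (j + 1) * t := by positivity
      have heven : PySem.Int.mod (2 ^ (j + 1) * t) 2 = 0 := by
        rw [PySem.Int.mod_eq_emod_of_pos (by omega)]
        exact Int.emod_eq_zero_of_dvd ⟨2 ^ j * t, by ring⟩
      have hdiv : PySem.Int.floordiv (2 ^ (j + 1) * t) 2 = 2 ^ j * t := by
        rw [PySem.Int.floordiv_eq_ediv_of_pos (by omega),
            show (2:Int) ^ (j + 1) * t = 2 * (2 ^ j * t) by ring,
            Int.mul_ediv_cancel_left _ (by omega)]
      simp only [wnafLoopA, if_pos hk]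
      rw [if_neg (show ¬ (PySem.Int.mod (2 ^ (j + 1) * t) 2 ≠ 0) by simp only [ne_eq, not_not]; exact heven), hdiv,
          IHj t f ht (by omega), show f + 1 - (j + 1) = f - j by omega, List.replicate_succ]
      simp

-- Main equivalence of the two loops, strong induction on k.
lemma loop_eq (e : Nat) (he : 1 ≤ e) :
    ∀ (n : Nat) (k : Int), 0 < k → k.toNat = n →
      ∀ (fA fB : Nat), n < fA → n < fB →
        wnafLoopA (2 ^ (e + 1)) (2 ^ e) fA k = wnafLoopB (2 ^ (e + 1)) (2 ^ e) e fB k := by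
  intro n
  induction n using Nat.strong_induction_on with
  | _ n IH =>
  intro k hk hkn fA fB hfA hfB
  obtain ⟨fA, rfl⟩ : ∃ f', fA = f' + 1 := ⟨fA - 1, by omega⟩
  obtain ⟨fB, rfl⟩ : ∃ f', fB = f' + 1 := ⟨fB - 1, by omega⟩
  have hh : (0:Int) < 2 ^ e := by positivity
  have hee : e < 2 ^ e := Nat.lt_two_pow_self
  have hhe : ((e:Int) + 1) ≤ 2 ^ e := by exact_mod_cast hee
  have hm : ((2:Int) ^ (e + 1)) = 2 * 2 ^ e := by ring
  simp only [wnafLoopA, wnafLoopB, if_pos hk, if_pos (show k ≠ 0 by omega)]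
  by_cases hodd : PySem.Int.mod k 2 ≠ 0
  · rw [if_pos hodd, if_pos hodd]
    have hk2 : k % 2 = 1 := by
      have := Int.emod_two_eq k
      rw [PySem.Int.mod_eq_emod_of_pos (by omega)] at hodd
      omega
    -- the two digit formulas agree
    have hd : (if PySem.Int.mod k (2 ^ (e + 1)) ≥ 2 ^ e then
                 PySem.Int.mod k (2 ^ (e + 1)) - 2 ^ (e + 1)
               else PySem.Int.mod k (2 ^ (e + 1)))
        = PySem.Int.mod (k + 2 ^ e) (2 ^ (e + 1)) - 2 ^ e := by
      rw [hm]; exact digit_eq k (2 ^ e) hh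
    set d := PySem.Int.mod (k + 2 ^ e) (2 ^ (e + 1)) - 2 ^ e with hdd
    set q := (k + 2 ^ e) / (2 * 2 ^ e) with hq
    have hkd : k - d = 2 * (2 ^ e * q) := by
      rw [hdd, hm, PySem.Int.mod_eq_emod_of_pos (by omega), Int.emod_def, hq]; ring
    have hq0 : 0 ≤ q := Int.ediv_nonneg (by omega) (by omega)
    have hA : PySem.Int.floordiv (k - d) 2 = 2 ^ e * q := by
      rw [PySem.Int.floordiv_eq_ediv_of_pos (by omega), hkd,
          Int.mul_ediv_cancel_left _ (by omega)]
    have hB : PySem.Int.floordiv (k - d) (2 ^ (e + 1)) = q := by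
      rw [PySem.Int.floordiv_eq_ediv_of_pos (by omega), hkd, hm,
          show (2:Int) * (2 ^ e * q) = 2 * 2 ^ e * q by ring,
          Int.mul_ediv_cancel_left _ (by omega)]
    rw [hd, hA, hB]
    by_cases hq1 : q = 0
    · rw [hq1, mul_zero, loopA_nil _ _ _ _ (lt_irrefl 0), loopB_nil,
          if_neg (by simp)]
      simp
    · -- q > 0 : here k ≥ 2^e, and A walks the e guaranteed zeros one by one
      have hq2 : 0 < q := by omega
      have hd0 : -2 ^ e ≤ d := by
        have : 0 ≤ PySem.Int.mod (k + 2 ^ e) (2 ^ (e + 1)) := by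
          rw [PySem.Int.mod_eq_emod_of_pos (by positivity)]
          exact Int.emod_nonneg _ (by positivity)
        omega
      have h2q : (2:Int) ^ e ≤ 2 ^ e * q := le_mul_of_one_le_right hh.le (by omega)
      have hdodd : d % 2 = 1 := by omega
      have hd1 : -2 ^ e + 1 ≤ d := by
        rcases dvd_pow_self (2:Int) (show e ≠ 0 by omega) with ⟨c, hc⟩
        omega
      have hqk : 2 ^ e * q < k := by linarith
      have hfuel : ((e:Int) + q) ≤ 2 ^ e * q := by
        nlinarith [mul_nonneg (by linarith : (0:Int) ≤ 2 ^ e - 1 - e)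
          (by linarith : (0:Int) ≤ q - 1)]
      have hXpos : (0:Int) < 2 ^ e * q := by positivity
      have hfA2 : e + q.toNat < fA := by omega
      have hqn : q.toNat < n := by omega
      rw [if_pos (show q ≠ 0 from hq1),
          loopA_zeros _ _ e q fA hq2 (by omega),
          IH q.toNat hqn q hq2 rfl (fA - e) fB (by omega) (by omega)]
      simp
  · rw [if_neg hodd, if_neg hodd]
    have hk2 : k % 2 = 0 := by
      have := Int.emod_two_eq k
      rw [PySem.Int.mod_eq_emod_of_pos (by omega)] at hodd
      omega
    have hj : PySem.Int.floordiv k 2 = k / 2 := PySem.Int.floordiv_eq_ediv_of_pos (by omega)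
    have hj0 : 0 < k / 2 := by omega
    have hjn : (k / 2).toNat < n := by omega
    rw [hj, IH (k / 2).toNat hjn (k / 2) hj0 rfl fA fB (by omega) (by omega)]

-- ===== VERDICT (by name: the statement is the Claim_ definition above) =====
theorem compute_wnaf_spec : Claim_equal_compute_wnaf := by
  intro k w _ hpre
  unfold Spec_compute_wnaf compute_wnaf compute_wnaf_alt
  by_cases hk0 : k = 0
  · simp [hk0]
  · rw [if_neg hk0]
    by_cases hkneg : k ≤ 0
    · rw [if_pos hkneg, loopA_nil _ _ _ _ (by omega)]
    · rw [if_neg hkneg]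
      have hk : 0 < k := by omega
      have hw : 2 ≤ w := by
        rcases hpre with h | h | ⟨h, _⟩ <;> omega
      set e := (w - 1).toNat with hedef
      have he1 : 1 ≤ e := by omega
      have hwt : w.toNat = e + 1 := by omega
      have hh : PySem.Int.floordiv ((2:Int) ^ (e + 1)) 2 = 2 ^ e := by
        rw [PySem.Int.floordiv_eq_ediv_of_pos (by omega),
            show ((2:Int) ^ (e + 1)) = 2 * 2 ^ e by ring,
            Int.mul_ediv_cancel_left _ (by omega)]
      simp only [hwt, hh]
      exact loop_eq e he1 k.toNat k hk rfl (k.toNat + 1) (k.toNat + 1) (by omega) (by omega)
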